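-- pv_equiv track=rewrite | github.com/ASSERT-KTH/C4B_APR | data_directory/1062_problem_id/9833_author_id/Accepted.py | numdig
-- ===== SOURCE A (Python) =====
-- def numdig(n):
--     count=0
--     while n>0:
--         r=n%10
--         if r==4 or r==7:
--             count+=1
--         n=n//10
--     return count
-- ===== SOURCE B (Python) =====
-- def numdig(n):
--     if n <= 0:
--         return 0
--     return sum(1 for c in str(n) if c == '4' or c == '7')
-- ===== Notes on version B (the rewrite author's own statement) =====
-- stated objective: idiomatic
-- what changed: replaces the arithmetic digit-extraction loop (repeated modulus and floor-quotient by ten) with a scan over the decimal string representation counting '4' and '7' characters, guarding non-positive n exactly as A's never-entered loop does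
import Mathlib
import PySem

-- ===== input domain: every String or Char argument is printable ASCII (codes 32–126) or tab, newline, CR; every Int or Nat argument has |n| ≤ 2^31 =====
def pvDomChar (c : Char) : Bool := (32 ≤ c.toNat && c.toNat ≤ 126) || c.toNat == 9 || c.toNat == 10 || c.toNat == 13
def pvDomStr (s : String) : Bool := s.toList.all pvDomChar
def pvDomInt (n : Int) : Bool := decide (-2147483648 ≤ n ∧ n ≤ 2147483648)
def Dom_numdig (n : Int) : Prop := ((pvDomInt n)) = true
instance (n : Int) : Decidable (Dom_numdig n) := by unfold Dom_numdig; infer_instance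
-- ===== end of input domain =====

-- B replaces A's %10 // 10 digit-extraction loop by a scan over str(n) counting '4'/'7' characters (return value only; no mutation involved).

-- ===== PORT A =====
-- the 'while n>0' loop; state = (n, count)
def numdigGo (n : Int) (count : Int) : Int :=
  if h : n > 0 then
    let r := PySem.Int.mod n 10
    numdigGo (PySem.Int.floordiv n 10) (if r = 4 ∨ r = 7 then count + 1 else count)
  else count
termination_by n.toNat
decreasing_by
  rw [PySem.Int.floordiv_eq_ediv_of_pos (by omega : (0:Int) < 10)]
  omega

def numdig (n : Int) : Int := numdigGo n 0

-- ===== PORT B =====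
def numdig_alt (n : Int) : Int :=
  if n ≤ 0 then 0
  else (PySem.Int.toStr n).toList.foldl
    (fun acc c => if c = '4' ∨ c = '7' then acc + 1 else acc) 0

-- ===== PRECONDITION & SPEC =====
def Spec_numdig (n : Int) (out : Int) : Prop := out = numdig_alt n
instance (n : Int) (out : Int) : Decidable (Spec_numdig n out) := by unfold Spec_numdig; infer_instance

-- ===== CLAIM (what is proved, stated in full; the proofs are below) =====
def Claim_equal_numdig : Prop := ∀ (n : Int), Dom_numdig n → Spec_numdig n (numdig n)

-- ===== LEMMAS AND PROOFS =====

-- the count of 4/7 digits of a natural number, the common yardstick of both ports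
def luckyNat (m : Nat) : Nat :=
  if m = 0 then 0
  else (if m % 10 = 4 ∨ m % 10 = 7 then 1 else 0) + luckyNat (m / 10)
termination_by m
decreasing_by exact Nat.div_lt_self (Nat.pos_of_ne_zero (by assumption)) (by omega)

lemma luckyNat_zero : luckyNat 0 = 0 := by unfold luckyNat; simp

lemma luckyNat_pos (m : Nat) (h : m ≠ 0) :
    luckyNat m = (if m % 10 = 4 ∨ m % 10 = 7 then 1 else 0) + luckyNat (m / 10) := by
  rw [luckyNat]; simp [h]

lemma numdigGo_eq (n c : Int) : numdigGo n c = c + (luckyNat n.toNat : Int) := by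
  induction n, c using numdigGo.induct with
  | case1 n c h r ih =>
    rw [numdigGo]
    simp only [h, dite_true]
    simp only [dite_eq_ite] at ih
    rw [show r = PySem.Int.mod n 10 from rfl] at ih
    rw [ih]
    have h10 : (0:Int) < 10 := by omega
    have hfd : PySem.Int.floordiv n 10 = n / 10 := PySem.Int.floordiv_eq_ediv_of_pos h10
    have hmod : PySem.Int.mod n 10 = n % 10 := PySem.Int.mod_eq_emod_of_pos h10
    have hm : n.toNat ≠ 0 := by omega
    rw [luckyNat_pos n.toNat hm]
    have hdivcast : (n / 10).toNat = n.toNat / 10 := by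
      omega
    have hmodcast : n % 10 = ((n.toNat % 10 : Nat) : Int) := by omega
    have hcond : (r = 4 ∨ r = 7) ↔ (n.toNat % 10 = 4 ∨ n.toNat % 10 = 7) := by
      show (PySem.Int.mod n 10 = 4 ∨ PySem.Int.mod n 10 = 7) ↔ _
      rw [hmod, hmodcast]
      omega
    rw [hfd, hdivcast]
    by_cases hc : n.toNat % 10 = 4 ∨ n.toNat % 10 = 7
    · rw [if_pos (hcond.mpr hc), if_pos hc]
      push_cast; ring
    · rw [if_neg (fun h' => hc (hcond.mp h')), if_neg hc]
      push_cast; ring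
  | case2 n c h =>
    rw [numdigGo]
    simp only [h, dite_false]
    have : n.toNat = 0 := by omega
    rw [this, luckyNat_zero]
    simp

-- the char test of B's scan agrees with the digit test, digit by digit
lemma digitChar_lucky (d : Nat) (h : d < 10) :
    (decide (Nat.digitChar d = '4' ∨ Nat.digitChar d = '7')) = decide (d = 4 ∨ d = 7) := by
  interval_cases d <;> decide

lemma toDigitsCore_countP :
    ∀ (f n : Nat) (ds : List Char), n < f →
      (Nat.toDigitsCore 10 f n ds).countP (fun c => decide (c = '4' ∨ c = '7')) =
        luckyNat n + ds.countP (fun c => decide (c = '4' ∨ c = '7')) := by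
  intro f
  induction f with
  | zero => intro n ds h; omega
  | succ f ih =>
    intro n ds h
    by_cases hn : n = 0
    · subst hn
      simp [Nat.toDigitsCore, luckyNat_zero, Nat.digitChar]
    · rw [Nat.toDigitsCore]
      have hlt : n % 10 < 10 := Nat.mod_lt _ (by omega)
      have hdc := digitChar_lucky (n % 10) hlt
      rw [luckyNat_pos n hn]
      by_cases hz : n / 10 = 0
      · simp only [hz, if_true, List.countP_cons, hdc, luckyNat_zero]
        by_cases hc : n % 10 = 4 ∨ n % 10 = 7 <;> (simp [hc]; try omega)
      · simp only [hz, if_false]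
        rw [ih (n / 10) _ (by omega)]
        rw [List.countP_cons, hdc]
        by_cases hc : n % 10 = 4 ∨ n % 10 = 7 <;> (simp [hc]; try omega)

lemma toChars_countP (n : Int) (h : 0 < n) :
    ((PySem.Int.toChars n).countP (fun c => decide (c = '4' ∨ c = '7'))) = luckyNat n.toNat := by
  unfold PySem.Int.toChars
  rw [if_neg (by omega)]
  unfold Nat.toDigits
  rw [toDigitsCore_countP (n.toNat + 1) n.toNat [] (by omega)]
  simp

-- ===== VERDICT (by name: the statement is the Claim_ definition above) =====
theorem numdig_spec : Claim_equal_numdig := by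
  intro n _
  show numdig n = numdig_alt n
  unfold numdig numdig_alt
  rw [numdigGo_eq n 0]
  by_cases h : n ≤ 0
  · have : n.toNat = 0 := by omega
    simp [h, this, luckyNat_zero]
  · rw [if_neg h]
    rw [PySem.List.foldl_ite_add_one (fun c => c = '4' ∨ c = '7')]
    rw [PySem.Int.toList_toStr, toChars_countP n (by omega)]
    try simp
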